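-- pv_equiv track=rewrite | github.com/noname6962/algorytmy | so/algorytmy_planowania/opt.py | przewidzenie
-- ===== SOURCE A (Python) =====
-- def przewidzenie(odniesienia, check, i, slots):
--     wizja = [0] * slots
--
--     for j in range(slots):
--         for k in range(i+1, len(odniesienia)):
--             if odniesienia[k] != check[j]:
--                 wizja[j] = wizja[j] + 1
--             else:
--                 break
--     return wizja.index(max(wizja))
-- ===== SOURCE B (Python) =====
-- def przewidzenie(odniesienia, check, i, slots):
--     n = len(odniesienia)
--     # one pass over the future references: first occurrence position of each value
--     first = {}
--     dist = 0
--     for k in range(i + 1, n):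
--         v = odniesienia[k]
--         if v not in first:
--             first[v] = dist
--         dist += 1
--     # argmax over the cached slots: distance = first occurrence position, or dist if never seen
--     best_j = 0
--     best = None
--     for j, c in enumerate(check[:slots]):
--         d = first.get(c, dist)
--         if best is None or d > best:
--             best = d
--             best_j = j
--     return best_j
-- ===== Notes on version B (the rewrite author's own statement) =====
-- stated objective: faster
-- what changed: Replaces the per-slot rescan of the future references (slots nested linear scans) by one pass that records the first future occurrence position of each value in a dict, then a single argmax loop over the cached slots.
import Mathlib
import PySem

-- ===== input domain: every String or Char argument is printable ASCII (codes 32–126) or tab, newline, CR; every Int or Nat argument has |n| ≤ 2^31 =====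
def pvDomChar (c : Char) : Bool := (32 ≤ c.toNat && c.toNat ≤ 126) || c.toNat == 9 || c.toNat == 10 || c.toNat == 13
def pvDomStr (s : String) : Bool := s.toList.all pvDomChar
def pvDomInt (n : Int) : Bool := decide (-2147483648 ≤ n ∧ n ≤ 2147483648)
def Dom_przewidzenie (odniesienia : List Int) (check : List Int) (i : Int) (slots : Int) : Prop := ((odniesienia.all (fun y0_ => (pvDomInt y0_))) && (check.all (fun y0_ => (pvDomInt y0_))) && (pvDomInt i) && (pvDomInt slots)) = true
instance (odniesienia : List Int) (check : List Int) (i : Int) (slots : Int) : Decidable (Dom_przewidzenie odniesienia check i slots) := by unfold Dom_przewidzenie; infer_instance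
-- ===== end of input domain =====

-- B replaces A's per-slot rescan of the future references by one pass recording first
-- occurrence positions in a dict plus a single argmax pass (measured faster at large sizes).
-- ===== PORT A =====
-- inner loop: for k in range(i+1, len(odniesienia)): if odniesienia[k] != c: count += 1 else: break
def pvInnerA (odn : List Int) (c : Int) : List Int → Int
  | [] => 0
  | k :: ks => if PySem.List.pyGetD odn k 0 ≠ c then 1 + pvInnerA odn c ks else 0

def przewidzenie (odniesienia : List Int) (check : List Int) (i : Int) (slots : Int) : Int :=
  let wizja := (PySem.List.pyRange 0 slots 1).map (fun j =>
    pvInnerA odniesienia (PySem.List.pyGetD check j 0)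
      (PySem.List.pyRange (i + 1) (odniesienia.length : Int) 1))
  match PySem.List.max? wizja (fun x => x) with
  | none => 0
  | some m => ((PySem.List.index? wizja m).getD 0 : Int)

-- ===== PORT B =====
-- one pass over the future references, then one argmax pass over the cached slots
def przewidzenie_alt (odniesienia : List Int) (check : List Int) (i : Int) (slots : Int) : Int :=
  let n : Int := (odniesienia.length : Int)
  let st := (PySem.List.pyRange (i + 1) n 1).foldl
    (fun (st : PySem.Dict Int Int × Int) k =>
      let v := PySem.List.pyGetD odniesienia k 0
      (if st.1.contains v then st.1 else st.1.insert v st.2, st.2 + 1))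
    (PySem.Dict.empty, 0)
  let first := st.1
  let dist := st.2
  let res := (PySem.List.enumerate (PySem.List.slice check none (some slots)) 0).foldl
    (fun (acc : Int × Option Int) (p : Int × Int) =>
      let d := first.getD p.2 dist
      match acc.2 with
      | none => (p.1, some d)
      | some b => if d > b then (p.1, some d) else acc)
    (0, none)
  res.1

-- ===== PRECONDITION & SPEC =====
-- Pre_ is exactly the set of inputs on which the Python A returns normally: it excludes only
-- the inputs where A raises (slots < 1: ValueError on max of the empty wizja; a nonempty future
-- window with an out-of-range odniesienia[k] or check[j]: IndexError).
def Pre_przewidzenie (odniesienia : List Int) (check : List Int) (i : Int) (slots : Int) : Prop :=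
  1 ≤ slots ∧ -(odniesienia.length : Int) ≤ i + 1 ∧
    ((odniesienia.length : Int) ≤ i + 1 ∨ slots ≤ (check.length : Int))
instance (odniesienia : List Int) (check : List Int) (i : Int) (slots : Int) : Decidable (Pre_przewidzenie odniesienia check i slots) := by unfold Pre_przewidzenie; infer_instance

def pvWitness_przewidzenie : List Int × List Int × Int × Int := ([1, 2, 3], [2, 3], 0, 2)

def Spec_przewidzenie (odniesienia : List Int) (check : List Int) (i : Int) (slots : Int) (out : Int) : Prop := out = przewidzenie_alt odniesienia check i slots
instance (odniesienia : List Int) (check : List Int) (i : Int) (slots : Int) (out : Int) : Decidable (Spec_przewidzenie odniesienia check i slots out) := by unfold Spec_przewidzenie; infer_instance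

-- ===== CLAIM (what is proved, stated in full; the proofs are below) =====
def Claim_equal_przewidzenie : Prop := ∀ (odniesienia : List Int) (check : List Int) (i : Int) (slots : Int), Dom_przewidzenie odniesienia check i slots → Pre_przewidzenie odniesienia check i slots → Spec_przewidzenie odniesienia check i slots (przewidzenie odniesienia check i slots)


-- ===== LEMMAS AND PROOFS =====

-- proof-only helpers
def pvStep (f : Int → Int) (acc : Int × Option Int) (j : Int) : Int × Option Int :=
  match acc.2 with
  | none => (j, some (f j))
  | some b => if f j > b then (j, some (f j)) else acc

def pvStepP (dv : Int → Int) (acc : Int × Option Int) (p : Int × Int) : Int × Option Int :=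
  match acc.2 with
  | none => (p.1, some (dv p.2))
  | some b => if dv p.2 > b then (p.1, some (dv p.2)) else acc

def pvPass (odn : List Int) (st : PySem.Dict Int Int × Int) (k : Int) : PySem.Dict Int Int × Int :=
  let v := PySem.List.pyGetD odn k 0
  (if st.1.contains v then st.1 else st.1.insert v st.2, st.2 + 1)

def pvFirstIdx (odn : List Int) (c : Int) : List Int → Int → Option Int
  | [], _ => none
  | k :: t, m => if PySem.List.pyGetD odn k 0 = c then some m else pvFirstIdx odn c t (m + 1)

def pvKs (odn : List Int) (i : Int) : List Int :=
  PySem.List.pyRange (i + 1) (odn.length : Int) 1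

def pvDictSt (odn : List Int) (i : Int) : PySem.Dict Int Int × Int :=
  (pvKs odn i).foldl (pvPass odn) (PySem.Dict.empty, 0)

def pvDv (odn : List Int) (i : Int) (c : Int) : Int :=
  (pvDictSt odn i).1.getD c (pvDictSt odn i).2

def pvF (odn chk : List Int) (i : Int) (j : Int) : Int :=
  pvInnerA odn (PySem.List.pyGetD chk j 0) (pvKs odn i)

theorem pvPass_snd (odn : List Int) : ∀ (ks : List Int) (d : PySem.Dict Int Int) (m : Int),
    (ks.foldl (pvPass odn) (d, m)).2 = m + ks.length := by
  intro ks
  induction ks with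
  | nil => intro d m; simp
  | cons k t ih =>
    intro d m
    simp only [List.foldl_cons, pvPass]
    rw [ih]
    simp
    ring

theorem pvPass_get? (odn : List Int) : ∀ (ks : List Int) (d : PySem.Dict Int Int) (m c : Int),
    (ks.foldl (pvPass odn) (d, m)).1.get? c = (d.get? c).or (pvFirstIdx odn c ks m) := by
  intro ks
  induction ks with
  | nil => intro d m c; simp [pvFirstIdx]
  | cons k t ih =>
    intro d m c
    simp only [List.foldl_cons, pvPass, pvFirstIdx]
    by_cases hc : d.contains (PySem.List.pyGetD odn k 0)
    · rw [if_pos hc, ih]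
      by_cases hv : PySem.List.pyGetD odn k 0 = c
      · rw [if_pos hv]
        have hs : (d.get? c).isSome := by
          rw [← hv]
          rw [PySem.Dict.contains_eq_isSome_get?] at hc
          exact hc
        obtain ⟨x, hx⟩ := Option.isSome_iff_exists.mp hs
        rw [hx]
        simp [Option.or]
      · rw [if_neg hv]
    · rw [if_neg hc, ih]
      by_cases hv : PySem.List.pyGetD odn k 0 = c
      · rw [if_pos hv]
        have hn : d.get? c = none := by
          rw [← hv]
          rw [PySem.Dict.get?_eq_none_iff_contains]
          simpa using hc
        rw [PySem.Dict.get?_insert, if_pos hv.symm, hn]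
        simp [Option.or]
      · rw [if_neg hv]
        rw [PySem.Dict.get?_insert, if_neg (fun h => hv h.symm)]

theorem pvFirstIdx_getD (odn : List Int) : ∀ (ks : List Int) (c m : Int),
    (pvFirstIdx odn c ks m).getD (m + ks.length) = m + pvInnerA odn c ks := by
  intro ks
  induction ks with
  | nil => intro c m; simp [pvFirstIdx, pvInnerA]
  | cons k t ih =>
    intro c m
    simp only [pvFirstIdx, pvInnerA]
    by_cases hv : PySem.List.pyGetD odn k 0 = c
    · rw [if_pos hv, if_neg (by simp [hv])]
      simp
    · rw [if_neg hv, if_pos hv]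
      have := ih c (m + 1)
      simp only [List.length_cons]
      have harg : m + ((t.length : Int) + 1) = (m + 1) + (t.length : Int) := by ring
      push_cast
      rw [harg, this]
      ring

theorem pvDv_eq (odn : List Int) (i : Int) (c : Int) :
    pvDv odn i c = pvInnerA odn c (pvKs odn i) := by
  unfold pvDv pvDictSt
  rw [PySem.Dict.getD_eq_get?_getD, pvPass_get?, pvPass_snd]
  simp only [PySem.Dict.get?_empty, Option.or]
  have := pvFirstIdx_getD odn (pvKs odn i) c 0
  simpa using this

theorem pvStep_congr (f g : Int → Int) : ∀ (l : List Int) (acc : Int × Option Int),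
    (∀ j ∈ l, f j = g j) → l.foldl (pvStep f) acc = l.foldl (pvStep g) acc := by
  intro l
  induction l with
  | nil => intro acc _; rfl
  | cons j t ih =>
    intro acc h
    simp only [List.foldl_cons]
    have hj := h j (by simp)
    have hstep : pvStep f acc j = pvStep g acc j := by simp only [pvStep, hj]
    rw [hstep]
    exact ih _ (fun x hx => h x (by simp [hx]))

theorem pvStepP_const (dv : Int → Int) (h0 : ∀ c, dv c = 0) :
    ∀ (l : List (Int × Int)) (bj : Int), l.foldl (pvStepP dv) (bj, some 0) = (bj, some 0) := by
  intro l
  induction l with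
  | nil => intro bj; rfl
  | cons p t ih =>
    intro bj
    simp only [List.foldl_cons]
    have hstep : pvStepP dv (bj, some 0) p = (bj, some 0) := by
      simp [pvStepP, h0]
    rw [hstep]
    exact ih bj

theorem pvFoldlMaxZero : ∀ (l : List Int), (∀ x ∈ l, x = 0) → l.foldl max 0 = 0 := by
  intro l
  induction l with
  | nil => intro _; rfl
  | cons x t ih =>
    intro h
    have hx : x = 0 := h x (by simp)
    simp only [List.foldl_cons, hx, max_self]
    exact ih (fun y hy => h y (by simp [hy]))

theorem pvA_zero (n : Nat) (h1 : 1 ≤ n) :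
    (match PySem.List.max? ((PySem.List.pyRange 0 (n : Int) 1).map (fun _ => (0 : Int))) (fun x => x) with
      | none => (0 : Int)
      | some m => ((PySem.List.index? ((PySem.List.pyRange 0 (n : Int) 1).map (fun _ => (0 : Int))) m).getD 0 : Int)) = 0 := by
  have hcons : PySem.List.pyRange 0 (n : Int) 1 = 0 :: PySem.List.pyRange 1 (n : Int) 1 :=
    PySem.List.pyRange_one_cons (by exact_mod_cast h1)
  rw [hcons]
  simp only [List.map_cons]
  rw [PySem.List.max?_id_cons]
  rw [pvFoldlMaxZero _ (by
    intro x hx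
    rcases List.mem_map.mp hx with ⟨a, -, h⟩
    exact h.symm)]
  dsimp only
  rw [PySem.List.index?_cons_self]
  rfl

-- argmax side: relation between B's fold and A's index-of-max
theorem pvArgmax (f : Int → Int) : ∀ (n : Nat), 1 ≤ n →
    ∃ (m : Int) (k : Nat),
      PySem.List.max? (((PySem.List.pyRange 0 (n : Int) 1).map f)) (fun x => x) = some m ∧
      PySem.List.index? (((PySem.List.pyRange 0 (n : Int) 1).map f)) m = some k ∧
      (PySem.List.pyRange 0 (n : Int) 1).foldl (pvStep f) (0, none) = ((k : Int), some m) := by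
  intro n
  induction n with
  | zero => intro h; omega
  | succ n ih =>
    intro _
    by_cases hn : 1 ≤ n
    · obtain ⟨m, k, hmax, hidx, hfold⟩ := ih hn
      have hsplit : PySem.List.pyRange 0 ((n : Int) + 1) 1
          = PySem.List.pyRange 0 (n : Int) 1 ++ [(n : Int)] :=
        PySem.List.pyRange_one_succ_right (by positivity)
      have hcast : ((n + 1 : Nat) : Int) = (n : Int) + 1 := by push_cast; ring
      rw [hcast, hsplit, List.map_append, List.foldl_append, hfold]
      set W := (PySem.List.pyRange 0 (n : Int) 1).map f with hW
      have hWlen : W.length = n := by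
        rw [hW, List.length_map, PySem.List.length_pyRange_one]
        omega
      have hWne : W ≠ [] := by
        intro h; rw [h] at hWlen; simp at hWlen; omega
      obtain ⟨w0, t, hwt⟩ := List.exists_cons_of_ne_nil hWne
      have hm : m = t.foldl max w0 := by
        rw [hwt, PySem.List.max?_id_cons] at hmax
        exact (Option.some_inj.mp hmax).symm
      have hmax' : PySem.List.max? (W ++ [f (n : Int)]) (fun x => x) = some (max m (f (n : Int))) := by
        rw [hwt, List.cons_append, PySem.List.max?_id_cons, List.foldl_append]
        simp [hm]
      simp only [List.map_cons, List.map_nil, List.foldl_cons, List.foldl_nil, pvStep]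
      by_cases hgt : f (n : Int) > m
      · rw [if_pos hgt]
        refine ⟨f (n : Int), W.length, ?_, ?_, ?_⟩
        · rw [hmax', max_eq_right (le_of_lt hgt)]
        · apply PySem.List.index?_append_singleton_self
          intro hmem
          have := PySem.List.max?_isMax hmax _ hmem
          simp at this
          omega
        · rw [hWlen]
      · rw [if_neg hgt]
        refine ⟨m, k, ?_, ?_, rfl⟩
        · rw [hmax', max_eq_left (by omega)]
        · rw [PySem.List.index?_append_of_mem]
          · exact hidx
          · obtain ⟨hk, hEq, -⟩ := PySem.List.getElem_of_index?_eq_some hidx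
            exact hEq ▸ List.getElem_mem hk
    · have hn0 : n = 0 := by omega
      subst hn0
      refine ⟨f 0, 0, ?_, ?_, ?_⟩
      · have h1 : PySem.List.pyRange 0 ((1 : Nat) : Int) 1 = [0] := by decide
        rw [h1]
        simp [PySem.List.max?_id_cons]
      · have h1 : PySem.List.pyRange 0 ((1 : Nat) : Int) 1 = [0] := by decide
        rw [h1]
        simp only [List.map_cons, List.map_nil]
        rw [PySem.List.index?_cons_self]
      · have h1 : PySem.List.pyRange 0 ((1 : Nat) : Int) 1 = [0] := by decide
        rw [h1]
        simp [pvStep]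

-- ===== VERDICT (by name: the statement is the Claim_ definition above) =====
theorem przewidzenie_spec : Claim_equal_przewidzenie := by
  intro odniesienia check i slots _ hpre
  obtain ⟨h1, h2, h3⟩ := hpre
  unfold Spec_przewidzenie przewidzenie przewidzenie_alt
  show (match PySem.List.max?
      ((PySem.List.pyRange 0 slots 1).map (pvF odniesienia check i)) (fun x => x) with
    | none => (0 : Int)
    | some m => ((PySem.List.index?
        ((PySem.List.pyRange 0 slots 1).map (pvF odniesienia check i)) m).getD 0 : Int))
    = ((PySem.List.enumerate (PySem.List.slice check none (some slots)) 0).foldl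
        (pvStepP (pvDv odniesienia i)) (0, none)).1
  rw [show slots = ((slots.toNat : Nat) : Int) from by omega]
  by_cases hsc : slots ≤ (check.length : Int)
  · -- slots fits in check: B's slice is take; both sides are the same argmax
    rw [PySem.List.slice_to_natCast]
    rw [PySem.List.enumerate_eq_map_pyRange (check.take slots.toNat) 0]
    rw [show PySem.List.len (check.take slots.toNat) = ((slots.toNat : Nat) : Int) from by
      simp [PySem.List.len_eq]
      omega]
    rw [List.foldl_map]
    have hsp : (fun (acc : Int × Option Int) (j : Int) =>
        pvStepP (pvDv odniesienia i) acc (j, PySem.List.pyGetD (check.take slots.toNat) j 0))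
        = pvStep (fun j => pvDv odniesienia i (PySem.List.pyGetD (check.take slots.toNat) j 0)) := rfl
    rw [hsp]
    rw [pvStep_congr _ (pvF odniesienia check i) _ _ (by
      intro j hj
      have hjb := (PySem.List.mem_pyRange_one).mp hj
      have hj0 : 0 ≤ j := hjb.1
      have hjs : j < ((slots.toNat : Nat) : Int) := hjb.2
      have hjc : j.toNat < check.length := by omega
      have hjt : j.toNat < (check.take slots.toNat).length := by
        simp
        omega
      have hget : PySem.List.pyGetD (check.take slots.toNat) j 0 = PySem.List.pyGetD check j 0 := by
        rw [PySem.List.pyGetD_eq_getElem (check.take slots.toNat) 0 hj0 (by omega),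
            PySem.List.pyGetD_eq_getElem check 0 hj0 (by omega)]
        simp
      rw [hget, pvDv_eq]
      rfl)]
    obtain ⟨m, k, hmax, hidx, hfold⟩ := pvArgmax (pvF odniesienia check i) slots.toNat (by omega)
    rw [hmax]
    dsimp only
    rw [hidx, hfold]
    rfl
  · -- more slots than cached values: the future window is empty, both sides return 0
    have hwin : (odniesienia.length : Int) ≤ i + 1 := by
      rcases h3 with h | h
      · exact h
      · omega
    have hksnil : pvKs odniesienia i = [] := by
      unfold pvKs
      exact PySem.List.pyRange_one_eq_nil hwin
    have hf : pvF odniesienia check i = (fun _ => (0 : Int)) := by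
      funext j
      unfold pvF
      rw [hksnil]
      rfl
    have hdv0 : ∀ c, pvDv odniesienia i c = 0 := by
      intro c
      rw [pvDv_eq, hksnil]
      rfl
    rw [hf]
    rw [pvA_zero slots.toNat (by omega)]
    rw [PySem.List.slice_to_natCast]
    rcases check.take slots.toNat with _ | ⟨c, t⟩
    · rw [PySem.List.enumerate_nil]
      rfl
    · rw [PySem.List.enumerate_cons]
      simp only [List.foldl_cons]
      have hstep : pvStepP (pvDv odniesienia i) (0, none) (0, c) = (0, some 0) := by
        simp [pvStepP, hdv0]
      rw [hstep, pvStepP_const _ hdv0]
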